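-- pv_equiv track=rewrite | github.com/lalitg6376/DSA-LeetCode-Problem | fimaximumProductnd.py | fimaximumProductnd
-- ===== SOURCE A (Python) =====
-- def fimaximumProductnd(num,m):
--     n = len(num)
--     if m>n:
--         return -1
--
--     max_left = num[0]
--     min_left = num[0]
--     ans = float('-inf')
--
--     for j in range(m-1,n):
--         if j-(m-1)>0:
--             i = j-(m-1)
--             max_left = max(max_left,num[i])
--             min_left = min(min_left,num[i])
--
--         ans = max(
--             ans,max_left*num[j],
--             min_left*num[j]
--         )
--     return ans
-- ===== SOURCE B (Python) =====
-- def fimaximumProductnd(num, m):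
--     n = len(num)
--     if m > n:
--         return -1
--     best = None
--     for i in range(n):
--         for j in range(i + m - 1, n):
--             p = num[i] * num[j]
--             if best is None or p > best:
--                 best = p
--     return best
-- ===== Notes on version B (the rewrite author's own statement) =====
-- stated objective: simpler
-- what changed: Replaces A's single pass with sliding prefix max/min state by a plain O(n^2) brute force over all index pairs at distance >= m-1, keeping only the running best product.
import Mathlib
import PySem

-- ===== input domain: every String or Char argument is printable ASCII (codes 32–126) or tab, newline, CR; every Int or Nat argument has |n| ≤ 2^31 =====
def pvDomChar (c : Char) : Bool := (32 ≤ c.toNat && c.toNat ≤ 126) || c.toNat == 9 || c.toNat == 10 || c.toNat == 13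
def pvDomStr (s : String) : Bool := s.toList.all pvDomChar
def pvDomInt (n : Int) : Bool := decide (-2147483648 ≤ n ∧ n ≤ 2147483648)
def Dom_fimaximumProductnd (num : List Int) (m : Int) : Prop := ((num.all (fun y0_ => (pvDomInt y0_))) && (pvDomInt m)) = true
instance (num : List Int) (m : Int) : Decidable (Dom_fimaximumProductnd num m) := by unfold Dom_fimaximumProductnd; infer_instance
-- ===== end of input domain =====

-- B replaces A's sliding prefix-max/min pass by a plain brute force over all index
-- pairs at distance ≥ m-1, keeping only the running best product (objective: simpler).

-- num[i]: exact where the index is in range (all accesses are, under Pre_);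
-- out of range Python raises IndexError (excluded by Pre_), here defaulted to 0.
def pvAt (num : List Int) (i : Int) : Int := (PySem.List.pyGet? num i).getD 0

-- 'max(o, x)' where o may be the initial -inf / None sentinel: Python's
-- 'ans = max(ans, x)' resp. 'if best is None or p > best: best = p'.
def pvOMax (o : Option Int) (x : Int) : Option Int :=
  some (match o with | none => x | some v => max v x)

-- ===== PORT A =====
-- loop body of A, named so the proofs can speak about one fold step
def stepA (num : List Int) (m : Int) (st : Int × Int × Option Int) (j : Int) :
    Int × Int × Option Int :=
  let maxL := if j - (m-1) > 0 then max st.1 (pvAt num (j - (m-1))) else st.1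
  let minL := if j - (m-1) > 0 then min st.2.1 (pvAt num (j - (m-1))) else st.2.1
  -- ans = max(ans, max_left*num[j], min_left*num[j])
  (maxL, minL, pvOMax (pvOMax st.2.2 (maxL * pvAt num j)) (minL * pvAt num j))

def fimaximumProductnd (num : List Int) (m : Int) : Int :=
  let n : Int := num.length
  if m > n then -1
  else
    -- max_left = min_left = num[0]; ans = -inf (modelled none); for j in range(m-1, n): …
    let st := (PySem.List.pyRange (m-1) n 1).foldl (stepA num m) (pvAt num 0, pvAt num 0, none)
    -- under Pre_ the loop ran at least once, so ans is an int; the -inf fallthrough is defaulted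
    st.2.2.getD 0

-- ===== PORT B =====
def fimaximumProductnd_alt (num : List Int) (m : Int) : Int :=
  let n : Int := num.length
  if m > n then -1
  else
    -- best = None; for i in range(n): for j in range(i+m-1, n): best = updated running best
    let best := (PySem.List.pyRange 0 n 1).foldl
      (fun best i =>
        (PySem.List.pyRange (i + m - 1) n 1).foldl
          (fun best j => pvOMax best (pvAt num i * pvAt num j)) best)
      none
    -- under Pre_ some pair exists, so best is an int; the None fallthrough is defaulted
    best.getD 0

-- ===== PRECONDITION & SPEC =====
-- Pre_ excludes exactly m ≤ 0, where Python A always raises IndexError (num[0] on an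
-- empty list, or an index walked past the end by the wrap-around range(m-1, n)).
def Pre_fimaximumProductnd (_num : List Int) (m : Int) : Prop := 1 ≤ m
instance (num : List Int) (m : Int) : Decidable (Pre_fimaximumProductnd num m) := by
  unfold Pre_fimaximumProductnd; infer_instance
def pvWitness_fimaximumProductnd : List Int × Int := ([2, -3, 4], 2)

def Spec_fimaximumProductnd (num : List Int) (m : Int) (out : Int) : Prop := out = fimaximumProductnd_alt num m
instance (num : List Int) (m : Int) (out : Int) : Decidable (Spec_fimaximumProductnd num m out) := by unfold Spec_fimaximumProductnd; infer_instance

-- ===== CLAIM (what is proved, stated in full; the proofs are below) =====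
def Claim_equal_fimaximumProductnd : Prop := ∀ (num : List Int) (m : Int), Dom_fimaximumProductnd num m → Pre_fimaximumProductnd num m → Spec_fimaximumProductnd num m (fimaximumProductnd num m)

-- ===== LEMMAS AND PROOFS =====

theorem pvOMax_none_eq (x : Int) : pvOMax none x = some x := rfl
theorem pvOMax_some_eq (v x : Int) : pvOMax (some v) x = some (max v x) := rfl

theorem foldl_pvOMax_some (l : List Int) (w : Int) :
    l.foldl pvOMax (some w) = some (l.foldl max w) := by
  induction l generalizing w with
  | nil => rfl
  | cons x t ih => simp [List.foldl, pvOMax, ih]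

theorem foldl_pvOMax_none_cons (x : Int) (l : List Int) :
    (x :: l).foldl pvOMax none = some (l.foldl max x) := by
  simp [List.foldl, pvOMax, foldl_pvOMax_some]

-- characterization: the fold of pvOMax over a nonempty list is its maximum
theorem foldl_pvOMax_char (l : List Int) (h : l ≠ []) :
    ∃ v, l.foldl pvOMax none = some v ∧ v ∈ l ∧ ∀ x ∈ l, x ≤ v := by
  cases l with
  | nil => exact absurd rfl h
  | cons x t =>
    refine ⟨t.foldl max x, foldl_pvOMax_none_cons x t, ?_, ?_⟩
    · rcases PySem.List.foldl_max_mem t x with h1 | h1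
      · rw [h1]; exact List.mem_cons_self
      · exact List.mem_cons_of_mem _ h1
    · intro y hy
      rcases List.mem_cons.mp hy with rfl | hy
      · exact (PySem.List.le_foldl_max t y).1
      · exact (PySem.List.le_foldl_max t x).2 y hy

theorem foldl_omax_map (l : List Int) (f : Int → Int) (acc : Option Int) :
    l.foldl (fun b j => pvOMax b (f j)) acc = (l.map f).foldl pvOMax acc := by
  induction l generalizing acc with
  | nil => rfl
  | cons x t ih => simp [List.foldl, ih]

theorem foldl_foldl_pvOMax (L : List Int) (g : Int → List Int) (acc : Option Int) :
    L.foldl (fun b i => (g i).foldl pvOMax b) acc = (L.flatMap g).foldl pvOMax acc := by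
  induction L generalizing acc with
  | nil => rfl
  | cons x t ih => simp [List.foldl, List.flatMap_cons, List.foldl_append, ih]

-- the full candidate list B folds over
def pvLB (num : List Int) (m : Int) : List Int :=
  (PySem.List.pyRange 0 (num.length : Int) 1).flatMap
    (fun i => (PySem.List.pyRange (i + m - 1) (num.length : Int) 1).map
      (fun j => pvAt num i * pvAt num j))

theorem mem_pvLB (num : List Int) (m x : Int) :
    x ∈ pvLB num m ↔ ∃ i j : Int, 0 ≤ i ∧ i < (num.length : Int) ∧ i + m - 1 ≤ j ∧
      j < (num.length : Int) ∧ x = pvAt num i * pvAt num j := by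
  simp only [pvLB, List.mem_flatMap, List.mem_map, PySem.List.mem_pyRange_one]
  constructor
  · rintro ⟨i, ⟨h0, h1⟩, j, ⟨h2, h3⟩, rfl⟩; exact ⟨i, j, h0, h1, h2, h3, rfl⟩
  · rintro ⟨i, j, h0, h1, h2, h3, rfl⟩; exact ⟨i, ⟨h0, h1⟩, j, ⟨h2, h3⟩, rfl⟩

theorem B_normal (num : List Int) (m : Int) (h : ¬ m > (num.length : Int)) :
    fimaximumProductnd_alt num m = ((pvLB num m).foldl pvOMax none).getD 0 := by
  simp only [fimaximumProductnd_alt, if_neg h, pvLB]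
  rw [← foldl_foldl_pvOMax]
  congr 1
  apply PySem.List.foldl_congr_mem
  intro acc i _
  exact foldl_omax_map _ _ _

-- sign-split bound: minL ≤ x ≤ maxL ⇒ x*c is dominated by one of the two candidates
theorem mul_le_max_candidates (x maxL minL c : Int) (h1 : minL ≤ x) (h2 : x ≤ maxL) :
    x * c ≤ max (maxL * c) (minL * c) := by
  rcases le_or_gt 0 c with hc | hc
  · exact le_max_of_le_left (mul_le_mul_of_nonneg_right h2 hc)
  · exact le_max_of_le_right (mul_le_mul_of_nonpos_right h1 hc.le)

-- the loop invariant of A: after k iterations the max/min components are attained on and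
-- dominate the scanned prefix, and ans is the max over the admissible pairs seen so far
theorem invA (num : List Int) (m : Int) (_hm : 1 ≤ m) (_hmn : m ≤ (num.length : Int)) :
    ∀ k : Nat, (m - 1) + k ≤ (num.length : Int) →
    (∀ i : Int, 0 ≤ i → (i + 1 ≤ (k : Int) ∨ i = 0) →
        pvAt num i ≤ ((PySem.List.pyRange (m-1) ((m-1)+k) 1).foldl (stepA num m) (pvAt num 0, pvAt num 0, none)).1 ∧
        ((PySem.List.pyRange (m-1) ((m-1)+k) 1).foldl (stepA num m) (pvAt num 0, pvAt num 0, none)).2.1 ≤ pvAt num i) ∧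
    (∃ i : Int, 0 ≤ i ∧ (i + 1 ≤ (k : Int) ∨ i = 0) ∧
        ((PySem.List.pyRange (m-1) ((m-1)+k) 1).foldl (stepA num m) (pvAt num 0, pvAt num 0, none)).1 = pvAt num i) ∧
    (∃ i : Int, 0 ≤ i ∧ (i + 1 ≤ (k : Int) ∨ i = 0) ∧
        ((PySem.List.pyRange (m-1) ((m-1)+k) 1).foldl (stepA num m) (pvAt num 0, pvAt num 0, none)).2.1 = pvAt num i) ∧
    (if k = 0 then
        ((PySem.List.pyRange (m-1) ((m-1)+k) 1).foldl (stepA num m) (pvAt num 0, pvAt num 0, none)).2.2 = none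
     else ∃ v, ((PySem.List.pyRange (m-1) ((m-1)+k) 1).foldl (stepA num m) (pvAt num 0, pvAt num 0, none)).2.2 = some v ∧
        (∃ i j : Int, 0 ≤ i ∧ i + m - 1 ≤ j ∧ j < (m-1) + k ∧ v = pvAt num i * pvAt num j) ∧
        (∀ i j : Int, 0 ≤ i → i + m - 1 ≤ j → m - 1 ≤ j → j < (m-1) + k → pvAt num i * pvAt num j ≤ v)) := by
  intro k
  induction k with
  | zero =>
    intro _
    simp only [Nat.cast_zero, add_zero, PySem.List.pyRange_one_eq_nil (le_refl (m-1)),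
      List.foldl_nil]
    refine ⟨?_, ⟨0, le_refl 0, Or.inr rfl, rfl⟩, ⟨0, le_refl 0, Or.inr rfl, rfl⟩, by simp⟩
    intro i hi0 hir
    have : i = 0 := by omega
    subst this
    exact ⟨le_refl _, le_refl _⟩
  | succ k ih =>
    intro hk
    have hk' : (m - 1) + (k : Int) ≤ (num.length : Int) := by push_cast at hk ⊢; omega
    have hsplit : PySem.List.pyRange (m-1) ((m-1) + ((k+1 : Nat) : Int)) 1
        = PySem.List.pyRange (m-1) ((m-1) + (k : Int)) 1 ++ [(m-1) + (k : Int)] := by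
      push_cast
      rw [show (m-1) + ((k : Int) + 1) = ((m-1) + (k : Int)) + 1 by ring]
      exact PySem.List.pyRange_one_succ_right (by omega)
    rw [hsplit, List.foldl_append]
    set stk := (PySem.List.pyRange (m-1) ((m-1) + (k : Int)) 1).foldl (stepA num m)
      (pvAt num 0, pvAt num 0, none) with hstk
    obtain ⟨hbd, ⟨i1, hi10, hi1r, hi1e⟩, ⟨i2, hi20, hi2r, hi2e⟩, hans⟩ := ih hk'
    simp only [List.foldl_cons, List.foldl_nil, stepA]
    rw [show (m-1) + (k : Int) - (m-1) = (k : Int) by ring]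
    rcases Nat.eq_zero_or_pos k with hk0 | hkpos
    · -- first iteration: no prefix update, ans was none
      subst hk0
      rw [if_pos rfl] at hans
      have hi1z : i1 = 0 := by omega
      have hi2z : i2 = 0 := by omega
      subst hi1z; subst hi2z
      simp only [Nat.cast_zero, gt_iff_lt, lt_self_iff_false, if_false, hans,
        pvOMax_none_eq, pvOMax_some_eq, add_zero]
      refine ⟨?_, ⟨0, le_refl 0, Or.inr rfl, hi1e⟩, ⟨0, le_refl 0, Or.inr rfl, hi2e⟩, ?_⟩
      · intro i hi0 hir
        have : i = 0 := by omega
        subst this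
        exact hbd 0 (le_refl 0) (Or.inr rfl)
      · simp only [Nat.zero_add, Nat.one_ne_zero, if_false]
        refine ⟨max (stk.1 * pvAt num (m-1)) (stk.2.1 * pvAt num (m-1)), rfl, ?_, ?_⟩
        · refine ⟨0, m-1, le_refl 0, by omega, by omega, ?_⟩
          rw [hi1e, hi2e, max_self]
        · intro i j hi0 hij hj1 hj2
          have hj : j = m - 1 := by omega
          have hiz : i = 0 := by omega
          subst hj; subst hiz
          rw [hi1e, hi2e, max_self]
    · -- k ≥ 1: prefix update with index k, ans was some
      have hkposI : (0 : Int) < (k : Int) := by exact_mod_cast hkpos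
      simp only [if_pos hkposI, gt_iff_lt]
      have hne : k ≠ 0 := by omega
      simp only [if_neg hne] at hans
      obtain ⟨v, hv, ⟨ia, ja, hia0, hiaj, hja2, hvaeq⟩, hvbd⟩ := hans
      -- cast / bound facts established while no max/min terms are in the context
      have hk1 : ((k+1 : Nat) : Int) = (k : Int) + 1 := by push_cast; ring
      have hknn : (0 : Int) ≤ (k : Int) := Int.natCast_nonneg k
      have hi1r' : i1 + 1 ≤ ((k+1 : Nat) : Int) ∨ i1 = 0 := by rw [hk1]; omega
      have hi2r' : i2 + 1 ≤ ((k+1 : Nat) : Int) ∨ i2 = 0 := by rw [hk1]; omega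
      have hkr' : (k : Int) + 1 ≤ ((k+1 : Nat) : Int) ∨ (k : Int) = 0 := Or.inl hk1.symm.le
      have hja2' : ja < (m-1) + ((k+1 : Nat) : Int) := by rw [hk1]; omega
      have htlt : (m-1) + (k : Int) < (m-1) + ((k+1 : Nat) : Int) := by rw [hk1]; omega
      have hile : ∀ i : Int, (i + 1 ≤ (k : Int) ∨ i = 0) → i + m - 1 ≤ (m-1) + (k : Int) := by
        intro i h; omega
      have hkle : (k : Int) + m - 1 ≤ (m-1) + (k : Int) := by omega
      have hcov : ∀ i : Int, 0 ≤ i → i + m - 1 ≤ (m-1) + (k : Int) →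
          (i + 1 ≤ ((k+1 : Nat) : Int) ∨ i = 0) := by
        intro i h1 h2; rw [hk1]; omega
      have hsplitj : ∀ j : Int, j < (m-1) + ((k+1 : Nat) : Int) → j ≠ (m-1) + (k : Int) →
          j < (m-1) + (k : Int) := by
        intro j h1 h2; rw [hk1] at h1; omega
      simp only [hv, pvOMax_some_eq]
      have hbd' : ∀ i : Int, 0 ≤ i → (i + 1 ≤ ((k+1 : Nat) : Int) ∨ i = 0) →
          pvAt num i ≤ max stk.1 (pvAt num k) ∧ min stk.2.1 (pvAt num k) ≤ pvAt num i := by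
        intro i hi0 hir
        by_cases hik : i = (k : Int)
        · subst hik
          exact ⟨le_max_right _ _, min_le_right _ _⟩
        · have hir' : i + 1 ≤ (k : Int) ∨ i = 0 := by rw [hk1] at hir; omega
          obtain ⟨h1, h2⟩ := hbd i hi0 hir'
          exact ⟨le_trans h1 (le_max_left _ _), le_trans (min_le_left _ _) h2⟩
      refine ⟨hbd', ?_, ?_, ?_⟩
      · rcases max_choice stk.1 (pvAt num k) with hmx | hmx
        · exact ⟨i1, hi10, hi1r', by rw [hmx, hi1e]⟩
        · exact ⟨k, hknn, hkr', by rw [hmx]⟩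
      · rcases min_choice stk.2.1 (pvAt num k) with hmn' | hmn'
        · exact ⟨i2, hi20, hi2r', by rw [hmn', hi2e]⟩
        · exact ⟨k, hknn, hkr', by rw [hmn']⟩
      · simp only [Nat.succ_ne_zero, if_false]
        set t : Int := (m-1) + (k : Int) with ht
        set maxL : Int := max stk.1 (pvAt num k) with hmaxL
        set minL : Int := min stk.2.1 (pvAt num k) with hminL
        refine ⟨max (max v (maxL * pvAt num t)) (minL * pvAt num t), rfl, ?_, ?_⟩
        · -- attained
          rcases max_choice (max v (maxL * pvAt num t)) (minL * pvAt num t) with h1 | h1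
          · rcases max_choice v (maxL * pvAt num t) with h2 | h2
            · exact ⟨ia, ja, hia0, hiaj, hja2', by rw [h1, h2, hvaeq]⟩
            · rcases max_choice stk.1 (pvAt num k) with h3 | h3
              · refine ⟨i1, t, hi10, hile i1 hi1r, htlt, ?_⟩
                rw [h1, h2, hmaxL, h3, hi1e]
              · refine ⟨k, t, hknn, hkle, htlt, ?_⟩
                rw [h1, h2, hmaxL, h3]
          · rcases min_choice stk.2.1 (pvAt num k) with h3 | h3
            · refine ⟨i2, t, hi20, hile i2 hi2r, htlt, ?_⟩
              rw [h1, hminL, h3, hi2e]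
            · refine ⟨k, t, hknn, hkle, htlt, ?_⟩
              rw [h1, hminL, h3]
        · -- dominates
          intro i j hi0 hij hj1 hj2
          by_cases hjt : j = t
          · subst hjt
            obtain ⟨hle1, hle2⟩ := hbd' i hi0 (hcov i hi0 hij)
            calc pvAt num i * pvAt num t
                ≤ max (maxL * pvAt num t) (minL * pvAt num t) :=
                  mul_le_max_candidates (pvAt num i) maxL minL (pvAt num t) hle2 hle1
              _ ≤ max (max v (maxL * pvAt num t)) (minL * pvAt num t) :=
                  max_le_max (le_max_right _ _) (le_refl _)
          · exact le_trans (hvbd i j hi0 hij hj1 (hsplitj j hj2 hjt))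
              (le_trans (le_max_left _ _) (le_max_left _ _))

-- ===== VERDICT (by name: the statement is the Claim_ definition above) =====
theorem fimaximumProductnd_spec : Claim_equal_fimaximumProductnd := by
  intro num m _ hpre
  unfold Spec_fimaximumProductnd
  have hpre' : (1 : Int) ≤ m := hpre
  by_cases hmn : m > (num.length : Int)
  · simp [fimaximumProductnd, fimaximumProductnd_alt, if_pos hmn]
  · have hn : m ≤ (num.length : Int) := not_lt.mp hmn
    set k0 : Nat := ((num.length : Int) - (m-1)).toNat with hk0
    have hk0e : (m-1) + (k0 : Int) = (num.length : Int) := by omega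
    obtain ⟨hbd, _, _, hans⟩ := invA num m hpre' hn k0 (by omega)
    have hk0pos : k0 ≠ 0 := by omega
    rw [if_neg hk0pos] at hans
    rw [hk0e] at hans
    obtain ⟨v, hv, ⟨ia, ja, hia0, hiaj, hjan, hvaeq⟩, hvbd⟩ := hans
    rw [B_normal num m hmn]
    have hLBne : pvLB num m ≠ [] := by
      intro hnil
      have hmem : pvAt num 0 * pvAt num (m-1) ∈ pvLB num m :=
        (mem_pvLB num m _).mpr ⟨0, m-1, le_refl 0, by omega, by omega, by omega, rfl⟩
      rw [hnil] at hmem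
      exact (List.not_mem_nil) hmem
    obtain ⟨w, hw, hwmem, hwbd⟩ := foldl_pvOMax_char _ hLBne
    simp only [fimaximumProductnd, if_neg hmn]
    rw [hv, hw]
    simp only [Option.getD_some]
    have h1 : v ≤ w := by
      apply hwbd
      exact (mem_pvLB num m v).mpr ⟨ia, ja, hia0, by omega, hiaj, hjan, hvaeq⟩
    have h2 : w ≤ v := by
      obtain ⟨i, j, hi0, _, hij, hjn, hweq⟩ := (mem_pvLB num m w).mp hwmem
      rw [hweq]
      exact hvbd i j hi0 hij (by omega) hjn
    omega
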